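-- pv_equiv track=rewrite | github.com/KisloTAooAnkit/Python-Programs | Contest/Beuty of arr.py | NGL
-- ===== SOURCE A (Python) =====
-- def NGL(arr,twoRes):
--     stack = []
--     n = len(arr)
--     for i in range(n-1,-1,-1):
--         while(stack and arr[stack[-1]]<=arr[i]):
--             idx = stack.pop()
--             twoRes[idx] = twoRes[idx] and False
--         stack.append(i)
--     return twoRes
-- ===== SOURCE B (Python) =====
-- def NGL(arr, twoRes):
--     # Single left-to-right pass keeping the running maximum of the prefix:
--     # an element keeps its flag iff it is a strict prefix maximum.
--     # (Mutates twoRes in place, like the original.)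
--     mx = None
--     for j, x in enumerate(arr):
--         if mx is not None and x <= mx:
--             twoRes[j] = False
--         if mx is None or x > mx:
--             mx = x
--     return twoRes
-- ===== Notes on version B (the rewrite author's own statement) =====
-- stated objective: simpler
-- what changed: Replaced the right-to-left monotonic index stack (with an inner pop loop) by a single left-to-right pass that keeps the running prefix maximum and clears twoRes[j] unless arr[j] is a strict prefix maximum.
import Mathlib
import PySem

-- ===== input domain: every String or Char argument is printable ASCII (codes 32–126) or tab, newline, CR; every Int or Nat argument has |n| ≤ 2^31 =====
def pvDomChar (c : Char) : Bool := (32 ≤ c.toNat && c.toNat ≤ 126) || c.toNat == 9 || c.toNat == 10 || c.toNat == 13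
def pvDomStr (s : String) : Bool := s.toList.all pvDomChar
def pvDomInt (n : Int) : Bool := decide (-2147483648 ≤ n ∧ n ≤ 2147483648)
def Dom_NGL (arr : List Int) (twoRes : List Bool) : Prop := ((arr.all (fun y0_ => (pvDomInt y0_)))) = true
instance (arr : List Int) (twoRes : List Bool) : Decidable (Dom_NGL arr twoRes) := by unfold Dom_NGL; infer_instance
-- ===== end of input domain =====

-- B replaces A's right-to-left monotonic index stack by a single left-to-right
-- prefix-maximum scan (simpler); both Pythons mutate twoRes in place, the claim is
-- about the returned value. Pre_ excludes exactly the inputs where Python A raises.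

-- ===== PORT A =====
-- inner 'while' loop of A: pop while arr[stack[-1]] <= x, setting twoRes[idx] = twoRes[idx] and False.
-- Python raises IndexError when idx >= len(twoRes); List.set is a no-op there — those inputs are outside Pre_NGL.
def NGL_pop (arr : List Int) (x : Int) : List Int → List Bool → List Int × List Bool
  | [], t => ([], t)
  | idx :: rest, t =>
    if PySem.List.pyGetD arr idx 0 ≤ x then
      NGL_pop arr x rest (t.set idx.toNat (PySem.List.pyGetD t idx false && false))
    else (idx :: rest, t)

-- body of 'for i in range(n-1,-1,-1)': run the while loop, then stack.append(i) (top of stack = head)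
def NGL_body (arr : List Int) (st : List Int × List Bool) (i : Int) : List Int × List Bool :=
  let p := NGL_pop arr (PySem.List.pyGetD arr i 0) st.1 st.2
  (i :: p.1, p.2)

def NGL (arr : List Int) (twoRes : List Bool) : List Bool :=
  let n : Int := arr.length
  ((PySem.List.pyRange (n - 1) (-1) (-1)).foldl (NGL_body arr) ([], twoRes)).2

-- ===== PORT B =====
-- body of 'for j, x in enumerate(arr)': clear twoRes[j] unless x is a strict prefix maximum, update mx.
-- twoRes[j] = False raises IndexError in Python when j >= len(twoRes); List.set no-ops there — outside Pre_NGL.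
def NGL_altBody (st : Option Int × List Bool) (p : Int × Int) : Option Int × List Bool :=
  ( (match st.1 with
     | none => some p.2
     | some m => if m < p.2 then some p.2 else some m),
    (match st.1 with
     | some m => if p.2 ≤ m then st.2.set p.1.toNat false else st.2
     | none => st.2) )

def NGL_alt (arr : List Int) (twoRes : List Bool) : List Bool :=
  ((PySem.List.enumerate arr 0).foldl NGL_altBody (none, twoRes)).2

-- ===== PRECONDITION & SPEC =====
-- Pre_ excludes exactly the inputs where Python A raises IndexError: some index j whose flag
-- must be cleared (a strictly greater-or-equal element exists on its left) lies beyond len(twoRes).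
-- (Python B raises on exactly the same inputs.)
def Pre_NGL (arr : List Int) (twoRes : List Bool) : Prop :=
  ∀ j ∈ List.range arr.length,
    (∃ i ∈ List.range j, arr.getD j 0 ≤ arr.getD i 0) → j < twoRes.length
instance (arr : List Int) (twoRes : List Bool) : Decidable (Pre_NGL arr twoRes) := by
  unfold Pre_NGL; infer_instance

def pvWitness_NGL : List Int × List Bool := ([2, 1], [true, true])

def Spec_NGL (arr : List Int) (twoRes : List Bool) (out : List Bool) : Prop := out = NGL_alt arr twoRes
instance (arr : List Int) (twoRes : List Bool) (out : List Bool) : Decidable (Spec_NGL arr twoRes out) := by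
  unfold Spec_NGL; infer_instance

-- ===== CLAIM (what is proved, stated in full; the proofs are below) =====
def Claim_equal_NGL : Prop := ∀ (arr : List Int) (twoRes : List Bool), Dom_NGL arr twoRes → Pre_NGL arr twoRes → Spec_NGL arr twoRes (NGL arr twoRes)

-- ===== LEMMAS AND PROOFS =====

-- arr[j] for an Int index (as both ports read it)
def aV (arr : List Int) (j : Int) : Int := PySem.List.pyGetD arr j 0

-- "index k gets its flag cleared": k in range and some element at or above it sits on its left
def WrB (arr : List Int) (k : Nat) : Bool :=
  decide (k < arr.length) && (List.range k).any (fun j => decide (arr.getD k 0 ≤ arr.getD j 0))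

theorem pv_aV_toNat (arr : List Int) (j : Int) (hj : 0 ≤ j) : aV arr j = arr.getD j.toNat 0 := by
  have h := PySem.List.pyGetD_natCast (xs := arr) (n := j.toNat) (d := 0)
  rw [show ((j.toNat : Nat) : Int) = j from by omega] at h
  simpa [aV] using h

theorem pv_WrB_iff (arr : List Int) (k : Nat) :
    WrB arr k = true ↔ (k < arr.length ∧ ∃ j : Int, 0 ≤ j ∧ j < (k : Int) ∧ aV arr (k : Int) ≤ aV arr j) := by
  simp only [WrB, Bool.and_eq_true, List.any_eq_true, List.mem_range, decide_eq_true_eq]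
  constructor
  · rintro ⟨hk, j, hj, hle⟩
    refine ⟨hk, (j : Int), by positivity, by exact_mod_cast hj, ?_⟩
    rw [pv_aV_toNat arr _ (by positivity), pv_aV_toNat arr _ (by positivity)]
    simpa using hle
  · rintro ⟨hk, j, hj0, hjk, hle⟩
    rw [pv_aV_toNat arr _ (by positivity), pv_aV_toNat arr _ hj0] at hle
    exact ⟨hk, j.toNat, by omega, by simpa using hle⟩

theorem pv_set_get_self (t : List Bool) (k : Nat) :
    (t.set k false)[k]? = if k < t.length then some false else none := by
  simp [List.getElem?_set_self']
  split_ifs with h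
  · simp [h]
  · simp [List.getElem?_eq_none (le_of_not_gt h)]

theorem pv_pop_len (arr : List Int) (x : Int) :
    ∀ (stack : List Int) (t : List Bool), (NGL_pop arr x stack t).2.length = t.length := by
  intro stack
  induction stack with
  | nil => intro t; simp [NGL_pop]
  | cons idx rest ih =>
    intro t
    simp only [NGL_pop]
    split_ifs with h
    · rw [ih]; simp
    · rfl

theorem pv_pop_spec (arr : List Int) (x : Int) :
    ∀ (stack : List Int) (t : List Bool), (∀ j ∈ stack, 0 ≤ j) →
      (NGL_pop arr x stack t).1 = stack.dropWhile (fun j => decide (aV arr j ≤ x)) ∧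
      ∀ k : Nat, (NGL_pop arr x stack t).2[k]? =
        if (k : Int) ∈ stack.takeWhile (fun j => decide (aV arr j ≤ x))
        then (t.set k false)[k]? else t[k]? := by
  intro stack
  induction stack with
  | nil => intro t _; simp [NGL_pop]
  | cons idx rest ih =>
    intro t hnn
    have hidx0 : 0 ≤ idx := hnn idx (by simp)
    by_cases hle : aV arr idx ≤ x
    · have hpop : NGL_pop arr x (idx :: rest) t
          = NGL_pop arr x rest (t.set idx.toNat false) := by
        simp [NGL_pop, aV] at hle ⊢
        simp [hle]
      obtain ⟨ih1, ih2⟩ := ih (t.set idx.toNat false) (fun j hj => hnn j (by simp [hj]))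
      rw [hpop]
      constructor
      · rw [ih1, List.dropWhile_cons_of_pos (by simpa using hle)]
      · intro k
        rw [ih2 k, List.takeWhile_cons_of_pos (by simpa using hle)]
        by_cases hk : (k : Int) = idx
        · have hkn : idx.toNat = k := by omega
          subst hkn
          simp only [hk, List.mem_cons, true_or, if_pos]
          split_ifs with h2 <;> simp [pv_set_get_self]
        · have hkn : idx.toNat ≠ k := by omega
          have e1 : (t.set idx.toNat false)[k]? = t[k]? := by
            rw [List.getElem?_set_ne hkn]
          have e2 : ((t.set idx.toNat false).set k false)[k]? = (t.set k false)[k]? := by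
            rw [pv_set_get_self, pv_set_get_self]
            simp
          simp only [List.mem_cons, hk, false_or]
          split_ifs with h2
          · exact e2
          · exact e1
    · have hpop : NGL_pop arr x (idx :: rest) t = (idx :: rest, t) := by
        simp [NGL_pop, aV] at hle ⊢
        simp [hle]
      rw [hpop]
      refine ⟨by rw [List.dropWhile_cons_of_neg (by simpa using hle)], ?_⟩
      intro k
      rw [List.takeWhile_cons_of_neg (by simpa using hle)]
      simp

theorem pv_loopA_char (arr : List Int) (t0 : List Bool) :
    ∀ (i : Nat), i ≤ arr.length → ∀ (stack : List Int) (t : List Bool),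
      stack.Pairwise (· < ·) →
      (∀ j ∈ stack, (i : Int) ≤ j ∧ j < (arr.length : Int)) →
      (∀ j ∈ stack, ∀ kk : Int, (i : Int) ≤ kk → kk < j → aV arr kk < aV arr j) →
      (∀ j : Int, (i : Int) ≤ j → j < (arr.length : Int) → j ∉ stack →
        ∃ kk : Int, (i : Int) ≤ kk ∧ kk < j ∧ aV arr j ≤ aV arr kk) →
      t.length = t0.length →
      (∀ k : Nat, t[k]? = if ((i : Int) ≤ (k : Int) ∧ k < arr.length ∧ (k : Int) ∉ stack)
                          then (t0.set k false)[k]? else t0[k]?) →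
      ∀ k : Nat, ((PySem.List.pyRange ((i : Int) - 1) (-1) (-1)).foldl (NGL_body arr) (stack, t)).2[k]? =
        if WrB arr k then (t0.set k false)[k]? else t0[k]? := by
  intro i
  induction i with
  | zero =>
    intro _ stack t hpw hmem hmax hbad hlen ht k
    simp only [Nat.cast_zero] at hmem hmax hbad ht
    rw [show ((0 : Nat) : Int) - 1 = -1 from by norm_num,
        PySem.List.pyRange_neg_one_eq_nil le_rfl]
    simp only [List.foldl_nil]
    rw [ht k]
    by_cases hW : WrB arr k = true
    · obtain ⟨hk, j, hj0, hjk, hle⟩ := (pv_WrB_iff arr k).1 hW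
      have hnot : (k : Int) ∉ stack := by
        intro hin
        have := hmax _ hin j (by omega) hjk
        omega
      rw [if_pos ⟨by positivity, hk, hnot⟩, if_pos hW]
    · have hcond : ¬ ((0 : Int) ≤ (k : Int) ∧ k < arr.length ∧ (k : Int) ∉ stack) := by
        rintro ⟨-, hk, hnot⟩
        obtain ⟨kk, hkk0, hkkk, hle⟩ := hbad (k : Int) (by positivity) (by exact_mod_cast hk) hnot
        exact hW ((pv_WrB_iff arr k).2 ⟨hk, kk, hkk0, hkkk, hle⟩)
      rw [if_neg hcond, if_neg hW]
  | succ i ih =>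
    intro hin stack t hpw hmem hmax hbad hlen ht k
    have hrange : PySem.List.pyRange (((i + 1 : Nat) : Int) - 1) (-1) (-1)
        = (i : Int) :: PySem.List.pyRange ((i : Int) - 1) (-1) (-1) := by
      rw [show ((i + 1 : Nat) : Int) - 1 = (i : Int) from by push_cast; ring]
      exact PySem.List.pyRange_neg_one_cons (by omega)
    rw [hrange, List.foldl_cons]
    -- the body step: run the pop loop on x = arr[i], then push i
    have hnn : ∀ j ∈ stack, 0 ≤ j := fun j hj => by have := (hmem j hj).1; omega
    obtain ⟨hp1, hp2⟩ := pv_pop_spec arr (aV arr (i : Int)) stack t hnn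
    have hbody : NGL_body arr (stack, t) (i : Int)
        = ((i : Int) :: (NGL_pop arr (aV arr (i : Int)) stack t).1,
           (NGL_pop arr (aV arr (i : Int)) stack t).2) := rfl
    rw [hbody, hp1]
    set x := aV arr (i : Int) with hx
    set p : Int → Bool := fun j => decide (aV arr j ≤ x) with hpdef
    set tk := stack.takeWhile p with htk
    set dw := stack.dropWhile p with hdw
    -- basic facts about tk and dw
    have hsplit : tk ++ dw = stack := List.takeWhile_append_dropWhile
    have f1 : ∀ j ∈ dw, j ∈ stack := fun j hj => (List.dropWhile_sublist p).subset hj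
    have f2 : ∀ j ∈ tk, j ∈ stack ∧ aV arr j ≤ x := by
      intro j hj
      refine ⟨(List.takeWhile_sublist p).subset hj, ?_⟩
      have := List.mem_takeWhile_imp hj
      simpa [hpdef] using this
    have hpwdw : dw.Pairwise (· < ·) := hpw.sublist (List.dropWhile_sublist p)
    have f3 : ∀ j ∈ dw, x < aV arr j := by
      intro j hj
      rcases hdwc : dw with _ | ⟨d, ds⟩
      · rw [hdwc] at hj; simp at hj
      · have h0 : 0 < (stack.dropWhile p).length := by rw [← hdw, hdwc]; simp
        have hd : ¬ p ((stack.dropWhile p)[0]'h0) := List.dropWhile_get_zero_not p stack h0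
        have hd' : x < aV arr d := by
          have : (stack.dropWhile p)[0]'h0 = d := by
            have : stack.dropWhile p = d :: ds := by rw [← hdw, hdwc]
            simp [this]
          rw [this] at hd
          simpa [hpdef] using hd
        rw [hdwc] at hj
        rcases List.mem_cons.1 hj with rfl | hj'
        · exact hd'
        · -- d < j along the pairwise-sorted dw, then hmax gives aV d < aV j
          have hdj : d < j := by
            rw [hdwc] at hpwdw
            exact (List.pairwise_cons.1 hpwdw).1 j hj'
          have hjst : j ∈ stack := f1 j (by rw [hdwc]; simp [hj'])
          have hdst : d ∈ stack := f1 d (by rw [hdwc]; simp)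
          have hdlo : ((i + 1 : Nat) : Int) ≤ d := (hmem d hdst).1
          have := hmax j hjst d hdlo hdj
          omega
    have f4 : ∀ j ∈ stack, aV arr j ≤ x → j ∈ tk := by
      intro j hj hle
      rw [← hsplit] at hj
      rcases List.mem_append.1 hj with h | h
      · exact h
      · have := f3 j h; omega
    have f5 : ∀ j ∈ tk, j ∉ dw := by
      intro j hj hj'
      have := (f2 j hj).2
      have := f3 j hj'
      omega
    have hilt : (i : Int) < (arr.length : Int) := by exact_mod_cast hin
    -- apply the induction hypothesis to the new state
    refine ih (by omega) ((i : Int) :: dw) _ ?_ ?_ ?_ ?_ ?_ ?_ k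
    · -- pairwise
      refine List.pairwise_cons.2 ⟨?_, hpwdw⟩
      intro j hj
      have := (hmem j (f1 j hj)).1
      omega
    · -- membership bounds
      intro j hj
      rcases List.mem_cons.1 hj with rfl | hj'
      · exact ⟨le_refl _, hilt⟩
      · have := hmem j (f1 j hj')
        exact ⟨by omega, this.2⟩
    · -- maximality
      intro j hj kk hkk1 hkk2
      rcases List.mem_cons.1 hj with rfl | hj'
      · omega
      · rcases eq_or_lt_of_le hkk1 with rfl | hgt
        · exact lt_of_le_of_lt (le_of_eq hx.symm) (f3 j hj')
        · exact hmax j (f1 j hj') kk (by omega) hkk2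
    · -- badness witnesses
      intro j hj1 hj2 hj3
      have hji : j ≠ (i : Int) := fun h => hj3 (h ▸ List.mem_cons_self)
      have hj1' : ((i + 1 : Nat) : Int) ≤ j := by push_cast; omega
      by_cases hjst : j ∈ stack
      · have hjtk : j ∈ tk := by
          rw [← hsplit] at hjst
          rcases List.mem_append.1 hjst with h | h
          · exact h
          · exact absurd (List.mem_cons_of_mem _ h) hj3
        exact ⟨(i : Int), le_refl _, by omega, (f2 j hjtk).2⟩
      · obtain ⟨kk, h1, h2, h3⟩ := hbad j hj1' hj2 hjst
        exact ⟨kk, by push_cast at h1 ⊢; omega, h2, h3⟩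
    · rw [pv_pop_len]; exact hlen
    · -- the twoRes characterization at level i
      intro m
      rw [hp2 m]
      by_cases hmtk : (m : Int) ∈ tk
      · obtain ⟨hmst, hmle⟩ := f2 _ hmtk
        have hmlo := (hmem _ hmst).1
        have hmhi := (hmem _ hmst).2
        have hset : (t.set m false)[m]? = (t0.set m false)[m]? := by
          rw [pv_set_get_self, pv_set_get_self, hlen]
        have hnotc : (m : Int) ∉ (i : Int) :: dw := by
          intro hc
          rcases List.mem_cons.1 hc with h | h
          · omega
          · exact f5 _ hmtk h
        rw [if_pos hmtk, hset,
            if_pos ⟨by omega, by exact_mod_cast hmhi, hnotc⟩]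
      · rw [if_neg hmtk, ht m]
        by_cases hold : ((i + 1 : Nat) : Int) ≤ (m : Int) ∧ m < arr.length ∧ (m : Int) ∉ stack
        · have hnotc : (m : Int) ∉ (i : Int) :: dw := by
            intro hc
            rcases List.mem_cons.1 hc with h | h
            · have := hold.1; omega
            · exact hold.2.2 (f1 _ h)
          rw [if_pos hold, if_pos ⟨by have := hold.1; omega, hold.2.1, hnotc⟩]
        · rw [if_neg hold]
          rw [if_neg ?_]
          rintro ⟨hm1, hm2, hm3⟩
          have hmne : (m : Int) ≠ (i : Int) := fun h => hm3 (h ▸ List.mem_cons_self)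
          have hmdw : (m : Int) ∉ dw := fun h => hm3 (List.mem_cons_of_mem _ h)
          have hmst : (m : Int) ∉ stack := by
            rw [← hsplit]
            intro h
            rcases List.mem_append.1 h with h | h
            · exact hmtk h
            · exact hmdw h
          exact hold ⟨by push_cast; omega, hm2, hmst⟩

theorem pv_A_char (arr : List Int) (t0 : List Bool) (k : Nat) :
    (NGL arr t0)[k]? = if WrB arr k then (t0.set k false)[k]? else t0[k]? := by
  have h := pv_loopA_char arr t0 arr.length le_rfl [] t0 (by simp) (by simp) (by simp)
    (fun j h1 h2 _ => absurd h2 (by omega))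
    rfl
    (fun m => by
      rw [if_neg]
      rintro ⟨h1, h2, -⟩
      omega)
    k
  simpa [NGL] using h

-- the running-maximum update of B's loop (first component of NGL_altBody)
def pvUpd (mx : Option Int) (x : Int) : Option Int :=
  match mx with
  | none => some x
  | some m => if m < x then some x else some m

-- which prefix maxima B compares against: mx (if set) and the elements of l before position j
def PBadB (mx : Option Int) (l : List Int) (j : Nat) : Bool :=
  (match mx with | some m => decide (l.getD j 0 ≤ m) | none => false)
  || (List.range j).any (fun i => decide (l.getD j 0 ≤ l.getD i 0))

theorem pv_PBadB_iff (mx : Option Int) (l : List Int) (j : Nat) :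
    PBadB mx l j = true ↔
      ((∃ m, mx = some m ∧ l.getD j 0 ≤ m) ∨ ∃ i, i < j ∧ l.getD j 0 ≤ l.getD i 0) := by
  rcases mx with _ | m <;>
    simp [PBadB, List.any_eq_true, List.mem_range]

theorem pv_B_fold_char (l : List Int) :
    ∀ (s : Int), 0 ≤ s → ∀ (mx : Option Int) (t : List Bool) (k : Nat),
      ((PySem.List.enumerate l s).foldl NGL_altBody (mx, t)).2[k]? =
        if ((List.range l.length).any (fun j => decide ((k : Int) = s + j) && PBadB mx l j))
        then (t.set k false)[k]? else t[k]? := by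
  induction l with
  | nil => intro s hs mx t k; simp [PySem.List.enumerate_nil]
  | cons xa rest ih =>
    intro s hs mx t k
    rw [PySem.List.enumerate_cons, List.foldl_cons]
    have hstep : NGL_altBody (mx, t) (s, xa)
        = (pvUpd mx xa,
           if PBadB mx (xa :: rest) 0 then t.set s.toNat false else t) := by
      rcases mx with _ | m
      · simp [NGL_altBody, pvUpd, PBadB]
      · by_cases hxm : xa ≤ m
        · simp [NGL_altBody, pvUpd, PBadB, hxm, not_lt.2 hxm]
        · simp [NGL_altBody, pvUpd, PBadB, hxm, not_le.mp hxm]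
    rw [hstep, ih (s + 1) (by omega)]
    have hshift : ∀ j : Nat, PBadB (pvUpd mx xa) rest j = PBadB mx (xa :: rest) (j + 1) := by
      intro j
      have hL : PBadB (pvUpd mx xa) rest j = true ↔ PBadB mx (xa :: rest) (j + 1) = true := by
        rw [pv_PBadB_iff, pv_PBadB_iff]
        constructor
        · rintro (⟨m, hm, hle⟩ | ⟨i, hi, hle⟩)
          · rcases mx with _ | m0
            · injection hm with hm
              subst hm
              exact Or.inr ⟨0, by omega, by simpa using hle⟩
            · by_cases hlt : m0 < xa
              · rw [show pvUpd (some m0) xa = some xa from by simp [pvUpd, hlt]] at hm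
                injection hm with hm
                subst hm
                exact Or.inr ⟨0, by omega, by simpa using hle⟩
              · rw [show pvUpd (some m0) xa = some m0 from by simp [pvUpd, hlt]] at hm
                injection hm with hm
                subst hm
                exact Or.inl ⟨m0, rfl, by simpa using hle⟩
          · exact Or.inr ⟨i + 1, by omega, by simpa using hle⟩
        · rintro (⟨m, hm, hle⟩ | ⟨i, hi, hle⟩)
          · rcases mx with _ | m0
            · exact absurd hm (by simp)
            · injection hm with hm
              subst hm
              by_cases hlt : m0 < xa
              · refine Or.inl ⟨xa, by simp [pvUpd, hlt], ?_⟩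
                have h1 : rest.getD j 0 ≤ m0 := by simpa using hle
                omega
              · exact Or.inl ⟨m0, by simp [pvUpd, hlt], by simpa using hle⟩
          · rcases i with _ | i
            · have h1 : rest.getD j 0 ≤ xa := by simpa using hle
              rcases mx with _ | m0
              · exact Or.inl ⟨xa, by simp [pvUpd], h1⟩
              · by_cases hlt : m0 < xa
                · exact Or.inl ⟨xa, by simp [pvUpd, hlt], h1⟩
                · refine Or.inl ⟨m0, by simp [pvUpd, hlt], ?_⟩
                  omega
            · exact Or.inr ⟨i, by omega, by simpa using hle⟩
      exact Bool.coe_iff_coe.1 hL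
    have hcond : ((List.range (xa :: rest).length).any
          (fun j => decide ((k : Int) = s + j) && PBadB mx (xa :: rest) j) = true)
        ↔ (((k : Int) = s ∧ PBadB mx (xa :: rest) 0 = true)
           ∨ ((List.range rest.length).any
                (fun j => decide ((k : Int) = (s + 1) + j) && PBadB (pvUpd mx xa) rest j) = true)) := by
      simp only [List.any_eq_true, List.mem_range, Bool.and_eq_true, decide_eq_true_eq]
      constructor
      · rintro ⟨j, hj, hkj, hb⟩
        rcases j with _ | j
        · exact Or.inl ⟨by simpa using hkj, hb⟩
        · refine Or.inr ⟨j, by simpa using hj, by push_cast at hkj ⊢; omega, ?_⟩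
          rw [hshift j]; exact hb
      · rintro (⟨hk, hb⟩ | ⟨j, hj, hkj, hb⟩)
        · exact ⟨0, by simp, by simpa using hk, hb⟩
        · refine ⟨j + 1, by simpa using hj, by push_cast at hkj ⊢; omega, ?_⟩
          rw [← hshift j]; exact hb
    by_cases hk : (k : Int) = s
    · -- position k is written by this step iff PBadB … 0; the tail never touches it
      have htail : ¬ ((List.range rest.length).any
            (fun j => decide ((k : Int) = (s + 1) + j) && PBadB (pvUpd mx xa) rest j) = true) := by
        simp only [List.any_eq_true, List.mem_range, Bool.and_eq_true, decide_eq_true_eq]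
        rintro ⟨j, hj, hkj, -⟩
        omega
      rw [if_neg htail]
      by_cases hb : PBadB mx (xa :: rest) 0 = true
      · rw [if_pos hb, if_pos (hcond.2 (Or.inl ⟨hk, hb⟩))]
        have hks : s.toNat = k := by omega
        rw [hks]
      · have houter : ¬ ((List.range (xa :: rest).length).any
              (fun j => decide ((k : Int) = s + j) && PBadB mx (xa :: rest) j) = true) := by
          intro hc
          rcases hcond.1 hc with ⟨-, h⟩ | h
          · exact hb h
          · exact htail h
        rw [if_neg (by simpa using hb), if_neg houter]
    · -- position k untouched by this step
      have hne : s.toNat ≠ k := by omega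
      have e1 : (t.set s.toNat false)[k]? = t[k]? := List.getElem?_set_ne hne
      have e2 : ((if PBadB mx (xa :: rest) 0 then t.set s.toNat false else t).set k false)[k]?
            = (t.set k false)[k]? := by
        split_ifs with hb
        · rw [pv_set_get_self, pv_set_get_self]
          simp
        · rfl
      by_cases hc : ((List.range rest.length).any
            (fun j => decide ((k : Int) = (s + 1) + j) && PBadB (pvUpd mx xa) rest j) = true)
      · rw [if_pos hc, if_pos (hcond.2 (Or.inr hc)), e2]
      · have houter : ¬ ((List.range (xa :: rest).length).any
              (fun j => decide ((k : Int) = s + j) && PBadB mx (xa :: rest) j) = true) := by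
          intro hcc
          rcases hcond.1 hcc with ⟨hkk, -⟩ | h
          · exact hk hkk
          · exact hc h
        rw [if_neg hc, if_neg houter]
        split_ifs with hb
        · exact e1
        · rfl

theorem pv_B_char (arr : List Int) (t0 : List Bool) (k : Nat) :
    (NGL_alt arr t0)[k]? = if WrB arr k then (t0.set k false)[k]? else t0[k]? := by
  have h := pv_B_fold_char arr 0 le_rfl none t0 k
  have hcond : ((List.range arr.length).any
        (fun j => decide ((k : Int) = 0 + j) && PBadB none arr j) = true)
      ↔ WrB arr k = true := by
    simp only [List.any_eq_true, List.mem_range, Bool.and_eq_true, decide_eq_true_eq,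
      WrB, PBadB, Bool.false_or]
    constructor
    · rintro ⟨j, hj, hkj, hb⟩
      have : j = k := by omega
      subst this
      exact ⟨hj, hb⟩
    · rintro ⟨hk, hb⟩
      exact ⟨k, hk, by omega, hb⟩
  unfold NGL_alt
  rw [h]
  by_cases hW : WrB arr k = true
  · rw [if_pos (hcond.2 hW), if_pos hW]
  · rw [if_neg (fun hc => hW (hcond.1 hc)), if_neg hW]

-- ===== VERDICT (by name: the statement is the Claim_ definition above) =====
theorem NGL_spec : Claim_equal_NGL := by
  intro arr twoRes _ _
  unfold Spec_NGL
  apply List.ext_getElem?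
  intro k
  rw [pv_A_char, pv_B_char]
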